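-- pv_equiv track=rewrite | github.com/sjytoto-bot/soundstorm-automation | 07_AUTOMATION_자동화/thumbnail_intelligence/thumbnail_ab_test.py | _get_copies
-- ===== SOURCE A (Python) =====
-- _COPY_MAP: dict[str, list[str]] = {
--     "samurai":  ["SAMURAI", "RONIN", "THE KATANA"],
--     "battle":   ["BATTLE", "THE CLASH", "WAR CRY"],
--     "assassin": ["ASSASSIN", "THE SHADOW", "SILENT BLADE"],
--     "war":      ["WAR", "WAR DRUMS", "THE SIEGE"],
--     "dark":     ["DARKNESS", "THE VOID", "SHADOW REALM"],
--     "oriental": ["ORIENTAL", "DYNASTY", "THE EAST"],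
--     "royal":    ["ROYAL", "THE THRONE", "PROCESSION"],
--     "dragon":   ["DRAGON", "THE BEAST", "FIRE LORD"],
--     "warrior":  ["WARRIOR", "THE CHOSEN", "IRON WILL"],
--     "ghost":    ["GHOST", "THE SPIRIT", "PHANTOM"],
--     "ninja":    ["NINJA", "SHADOW RUN", "THE BLADE"],
--     "epic":     ["EPIC", "LEGEND", "THE RISE"],
--     "viking":   ["VIKING", "VALHALLA", "RAGNAROK"],
-- }
--
-- def _get_copies(theme: str) -> list[str]:
--     words   = theme.lower().split()
--     options: list[str] = []
--     seen:    set[str]  = set()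
--     for w in words:
--         for opt in _COPY_MAP.get(w, [w.upper()]):
--             if opt not in seen:
--                 options.append(opt)
--                 seen.add(opt)
--     if theme.upper() not in seen:
--         options.append(theme.upper())
--     return options
-- ===== SOURCE B (Python) =====
-- _COPY_MAP: dict[str, list[str]] = {
--     "samurai":  ["SAMURAI", "RONIN", "THE KATANA"],
--     "battle":   ["BATTLE", "THE CLASH", "WAR CRY"],
--     "assassin": ["ASSASSIN", "THE SHADOW", "SILENT BLADE"],
--     "war":      ["WAR", "WAR DRUMS", "THE SIEGE"],
--     "dark":     ["DARKNESS", "THE VOID", "SHADOW REALM"],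
--     "oriental": ["ORIENTAL", "DYNASTY", "THE EAST"],
--     "royal":    ["ROYAL", "THE THRONE", "PROCESSION"],
--     "dragon":   ["DRAGON", "THE BEAST", "FIRE LORD"],
--     "warrior":  ["WARRIOR", "THE CHOSEN", "IRON WILL"],
--     "ghost":    ["GHOST", "THE SPIRIT", "PHANTOM"],
--     "ninja":    ["NINJA", "SHADOW RUN", "THE BLADE"],
--     "epic":     ["EPIC", "LEGEND", "THE RISE"],
--     "viking":   ["VIKING", "VALHALLA", "RAGNAROK"],
-- }
--
-- def _get_copies(theme: str) -> list[str]: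
--     def expand(words: list[str]) -> list[str]:
--         if not words:
--             return [theme.upper()]
--         w = words[0]
--         return _COPY_MAP.get(w, [w.upper()]) + expand(words[1:])
--
--     def dedup(xs: list[str]) -> list[str]:
--         if not xs:
--             return []
--         head = xs[0]
--         return [head] + dedup([x for x in xs[1:] if x != head])
--
--     return dedup(expand(theme.lower().split()))
-- ===== Notes on version B (the rewrite author's own statement) =====
-- stated objective: alternative
-- what changed: B replaces A's single iterative pass with a seen-set by a recursive decomposition: a recursive expand builds the flat option list (ending with theme.upper()), and a recursive dedup keeps each head and filters its duplicates out of the tail before recursing, so no auxiliary set is maintained.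
import Mathlib
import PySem

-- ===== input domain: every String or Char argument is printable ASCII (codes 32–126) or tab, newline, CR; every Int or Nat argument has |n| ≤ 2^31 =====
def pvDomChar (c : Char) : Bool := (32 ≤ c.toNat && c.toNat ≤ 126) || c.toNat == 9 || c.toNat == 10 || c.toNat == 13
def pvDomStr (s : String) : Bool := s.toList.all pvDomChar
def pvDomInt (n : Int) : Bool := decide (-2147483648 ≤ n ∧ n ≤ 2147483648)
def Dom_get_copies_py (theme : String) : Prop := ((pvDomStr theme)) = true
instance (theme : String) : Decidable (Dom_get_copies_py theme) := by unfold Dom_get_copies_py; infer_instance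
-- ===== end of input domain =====

-- B replaces A's iterative seen-set pass by recursion: a recursive expand builds the flat
-- option list (ending with theme.upper()) and a recursive dedup filters each head out of
-- the tail before recursing; objective: alternative decomposition (no speed claim).

-- ===== PORT A =====
def pvCopyMap : PySem.Dict String (List String) := PySem.Dict.ofList [
  ("samurai",  ["SAMURAI", "RONIN", "THE KATANA"]),
  ("battle",   ["BATTLE", "THE CLASH", "WAR CRY"]),
  ("assassin", ["ASSASSIN", "THE SHADOW", "SILENT BLADE"]),
  ("war",      ["WAR", "WAR DRUMS", "THE SIEGE"]),
  ("dark",     ["DARKNESS", "THE VOID", "SHADOW REALM"]),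
  ("oriental", ["ORIENTAL", "DYNASTY", "THE EAST"]),
  ("royal",    ["ROYAL", "THE THRONE", "PROCESSION"]),
  ("dragon",   ["DRAGON", "THE BEAST", "FIRE LORD"]),
  ("warrior",  ["WARRIOR", "THE CHOSEN", "IRON WILL"]),
  ("ghost",    ["GHOST", "THE SPIRIT", "PHANTOM"]),
  ("ninja",    ["NINJA", "SHADOW RUN", "THE BLADE"]),
  ("epic",     ["EPIC", "LEGEND", "THE RISE"]),
  ("viking",   ["VIKING", "VALHALLA", "RAGNAROK"])]

def get_copies_py (theme : String) : List String :=
  let words := PySem.Str.split₀ (PySem.Str.lower theme)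
  let st := words.foldl (fun (st : List String × PySem.Set String) w =>
      (pvCopyMap.getD w [PySem.Str.upper w]).foldl
        (fun (st2 : List String × PySem.Set String) opt =>
          if st2.2.contains opt then st2 else (st2.1 ++ [opt], st2.2.add opt))
        st)
    ([], PySem.Set.empty)
  if st.2.contains (PySem.Str.upper theme) then st.1 else st.1 ++ [PySem.Str.upper theme]

-- ===== PORT B =====
-- B's recursive expand: options of each word, then theme.upper() at the end
def pvExpand (theme : String) : List String → List String
  | [] => [PySem.Str.upper theme]
  | w :: ws => pvCopyMap.getD w [PySem.Str.upper w] ++ pvExpand theme ws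

-- B's recursive dedup: keep the head, drop its duplicates from the tail, recurse
def pvRecDedup : List String → List String
  | [] => []
  | x :: xs => x :: pvRecDedup (xs.filter (fun y => y != x))
termination_by l => l.length
decreasing_by
  simp only [List.length_cons, List.length_unattach]
  exact Nat.lt_succ_of_le (le_trans (List.length_filter_le _ _) (by simp))

def get_copies_py_alt (theme : String) : List String :=
  pvRecDedup (pvExpand theme (PySem.Str.split₀ (PySem.Str.lower theme)))

-- ===== PRECONDITION & SPEC =====
def Spec_get_copies_py (theme : String) (out : List String) : Prop := out = get_copies_py_alt theme
instance (theme : String) (out : List String) : Decidable (Spec_get_copies_py theme out) := by unfold Spec_get_copies_py; infer_instance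

-- ===== CLAIM (what is proved, stated in full; the proofs are below) =====
def Claim_equal_get_copies_py : Prop := ∀ (theme : String), Dom_get_copies_py theme → Spec_get_copies_py theme (get_copies_py theme)

-- ===== LEMMAS AND PROOFS =====

-- A's dedup step keeps options and seen equal: folding it from a doubled state is
-- folding Set.add in both components.
theorem pvStepPair (l : List String) (s : PySem.Set String) :
    l.foldl (fun (st2 : List String × PySem.Set String) opt =>
        if st2.2.contains opt then st2 else (st2.1 ++ [opt], st2.2.add opt)) (s, s)
      = (l.foldl PySem.Set.add s, l.foldl PySem.Set.add s) := by
  induction l generalizing s with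
  | nil => rfl
  | cons x t ih =>
      simp only [List.foldl_cons]
      by_cases hm : x ∈ s
      · have h1 : (if (s : List String).contains x then ((s : List String), (s : PySem.Set String))
            else (s ++ [x], PySem.Set.add s x)) = (s, s) := by
          simp [hm]
        rw [h1, PySem.Set.add_of_mem hm]
        exact ih s
      · have h1 : (if (s : List String).contains x then ((s : List String), (s : PySem.Set String))
            else (s ++ [x], PySem.Set.add s x)) = (PySem.Set.add s x, PySem.Set.add s x) := by
          simp [hm]
        rw [h1]
        exact ih (PySem.Set.add s x)

-- folding over each g w in turn is folding over the flattened list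
theorem pvFoldFlat {α β γ : Type} (l : List α) (g : α → List β)
    (f : γ → β → γ) (init : γ) :
    l.foldl (fun st w => (g w).foldl f st) init = (l.flatMap g).foldl f init := by
  induction l generalizing init with
  | nil => rfl
  | cons x t ih => simp [List.flatMap_cons, List.foldl_append, ih]

-- B's expand is the flattened option list with theme.upper() appended
theorem pvExpand_eq (theme : String) (ws : List String) :
    pvExpand theme ws
      = ws.flatMap (fun w => pvCopyMap.getD w [PySem.Str.upper w]) ++ [PySem.Str.upper theme] := by
  induction ws with
  | nil => rfl
  | cons w t ih => simp [pvExpand, ih]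

-- Accumulating unseen elements into s is prepending s to B's recursive dedup of the
-- not-yet-seen elements.
theorem pvInv (xs : List String) (s : PySem.Set String) :
    xs.foldl PySem.Set.add s = s ++ pvRecDedup (xs.filter (fun y => !(s : List String).contains y)) := by
  induction xs generalizing s with
  | nil => simp [pvRecDedup]
  | cons x t ih =>
      simp only [List.foldl_cons]
      by_cases hm : x ∈ s
      · have hc : ((s : List String).contains x) = true := by simp [hm]
        rw [PySem.Set.add_of_mem hm, ih s]
        have hf : List.filter (fun y => !(s : List String).contains y) (x :: t)
            = List.filter (fun y => !(s : List String).contains y) t := by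
          simp [hm]
        rw [hf]
      ·
        rw [ih (PySem.Set.add s x)]
        have hset : (PySem.Set.add s x : List String) = s ++ [x] := by
          simp [PySem.Set.add]
          exact hm
        rw [hset]
        have hf : List.filter (fun y => !(s : List String).contains y) (x :: t)
            = x :: List.filter (fun y => !(s : List String).contains y) t := by
          simp [hm]
        rw [hf]
        have hfilter : t.filter (fun y => !(s ++ [x] : List String).contains y)
            = (t.filter (fun y => !(s : List String).contains y)).filter (fun y => y != x) := by
          rw [List.filter_filter]
          apply List.filter_congr
          intro y _
          by_cases hyx : y = x <;> simp [hyx]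
        rw [hfilter]
        simp [pvRecDedup]

-- main equality
theorem get_copies_py_eq (theme : String) :
    get_copies_py theme = get_copies_py_alt theme := by
  simp only [get_copies_py, get_copies_py_alt]
  rw [pvFoldFlat]
  have h0 : (([], PySem.Set.empty) : List String × PySem.Set String)
      = (([] : PySem.Set String), ([] : PySem.Set String)) := rfl
  rw [h0, pvStepPair, pvExpand_eq]
  set flat : List String :=
    (PySem.Str.split₀ (PySem.Str.lower theme)).flatMap
      (fun w => pvCopyMap.getD w [PySem.Str.upper w]) with hflat
  have hmain : (flat ++ [PySem.Str.upper theme]).foldl PySem.Set.add ([] : PySem.Set String)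
      = pvRecDedup (flat ++ [PySem.Str.upper theme]) := by
    rw [pvInv]
    simp
  rw [← hmain, List.foldl_append, List.foldl_cons, List.foldl_nil]
  set s : PySem.Set String := flat.foldl PySem.Set.add [] with hs
  by_cases hm : PySem.Str.upper theme ∈ s
  · have h1 : (s : List String).contains (PySem.Str.upper theme) = true := by simpa using hm
    rw [if_pos h1, PySem.Set.add_of_mem hm]
  · have h1 : (s : List String).contains (PySem.Str.upper theme) = false := by simpa using hm
    rw [h1, PySem.Set.add_of_not_mem hm]
    simp

-- ===== VERDICT (by name: the statement is the Claim_ definition above) =====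
theorem get_copies_py_spec : Claim_equal_get_copies_py := by
  intro theme _
  exact get_copies_py_eq theme
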